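-- pv_equiv track=rewrite | github.com/lcbc-epfl/comp_chem_py | src/comp_chem_utils/cpmd_utils.py | get_natoms
-- ===== SOURCE A (Python) =====
-- def get_natoms(lines):
--     """Get the number of atoms from a file like TRAJECTORY."""
--     istep = lines[0].split()[0]
--     natoms=0
--     for line in lines:
--         new_i = line.split()[0]
--         if new_i != istep:
--             return natoms
--         else:
--             natoms+=1
-- ===== SOURCE B (Python) =====
-- def get_natoms(lines):
--     """Get the number of atoms from a file like TRAJECTORY."""
--     istep = lines[0].split()[0]
--     toks = [(line.split() or [None])[0] for line in lines]
--     diffs = [i for i, t in enumerate(toks) if t != istep]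
--     return min(diffs) if diffs else None
-- ===== Notes on version B (the rewrite author's own statement) =====
-- stated objective: alternative
-- what changed: replaces A's single early-exit loop with a running counter by staged whole-list passes: tokenize every line once (None for a token-less line), build the full list of indices whose first token differs from the first line's, and return the minimum of that list (None if it is empty)
import Mathlib
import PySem

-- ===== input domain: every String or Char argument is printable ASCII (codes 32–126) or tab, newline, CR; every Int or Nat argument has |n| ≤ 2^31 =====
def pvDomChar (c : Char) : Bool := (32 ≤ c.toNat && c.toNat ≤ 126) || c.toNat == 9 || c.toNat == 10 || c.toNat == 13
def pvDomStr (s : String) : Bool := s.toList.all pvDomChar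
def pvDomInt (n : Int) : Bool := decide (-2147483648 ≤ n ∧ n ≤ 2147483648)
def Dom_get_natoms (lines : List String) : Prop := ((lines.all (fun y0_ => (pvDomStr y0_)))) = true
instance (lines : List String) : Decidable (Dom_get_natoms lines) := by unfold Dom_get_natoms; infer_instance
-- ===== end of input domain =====

-- B replaces A's early-exit counting loop by staged full passes: tokenize every line once, list ALL differing indices, return their minimum; objective: alternative.


-- first token of a line as an Option: some = line.split()[0]; none = no token (Python: (split() or [None])[0] is None; bare split()[0] raises IndexError)
def pvTok? (s : String) : Option String := (PySem.Str.split₀ s).head?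

-- ===== PORT A =====
-- A's for-loop: accumulator natoms; returns none when the loop runs off the end (Python returns None);
-- none on a token-less line stands for the IndexError, excluded by Pre_
def getNatomsLoopA (rest : List String) (istep : String) (natoms : Int) : Option Int :=
  match rest with
  | [] => none
  | line :: rest' =>
    match pvTok? line with
    | none => none
    | some new_i => if new_i ≠ istep then some natoms else getNatomsLoopA rest' istep (natoms + 1)

def get_natoms (lines : List String) : Option Int :=
  match lines.head? with
  | none => none                      -- lines[0] IndexError, excluded by Pre_
  | some l0 =>
    match pvTok? l0 with
    | none => none                    -- split()[0] IndexError, excluded by Pre_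
    | some istep => getNatomsLoopA lines istep 0

-- ===== PORT B =====
-- staged passes: istep = first line's first token, toks = ALL first tokens (None for a token-less line),
-- diffs = ALL indices whose token differs from istep, answer = min(diffs) if diffs else None
def get_natoms_alt (lines : List String) : Option Int :=
  match lines.head? with
  | none => none                      -- lines[0] IndexError, excluded by Pre_
  | some l0 =>
    match pvTok? l0 with
    | none => none                    -- split()[0] IndexError, excluded by Pre_
    | some istep =>
      let toks := lines.map pvTok?
      let diffs := ((PySem.List.enumerate toks 0).filter (fun p => p.2 != some istep)).map (fun p => p.1)
      if diffs = [] then none else PySem.List.min? diffs (fun x => x)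

-- ===== PRECONDITION & SPEC =====
-- Pre_ excludes exactly the inputs on which Python A raises IndexError: the empty list, and lists where
-- some line reached by A's scan (every earlier line's first token equals the first line's) has no token.
def Pre_get_natoms (lines : List String) : Prop :=
  lines ≠ [] ∧ ∀ i < lines.length,
    (∀ j < i, (lines.map pvTok?)[j]? = (lines.map pvTok?)[0]?) → (lines.map pvTok?)[i]? ≠ some none
instance (lines : List String) : Decidable (Pre_get_natoms lines) := by unfold Pre_get_natoms; infer_instance

def pvWitness_get_natoms : List String := ["1 a", "1 b", "2 c"]

def Spec_get_natoms (lines : List String) (out : Option Int) : Prop := out = get_natoms_alt lines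
instance (lines : List String) (out : Option Int) : Decidable (Spec_get_natoms lines out) := by unfold Spec_get_natoms; infer_instance

-- ===== CLAIM =====
def Claim_equal_get_natoms : Prop := ∀ (lines : List String), Dom_get_natoms lines → Pre_get_natoms lines → Spec_get_natoms lines (get_natoms lines)

-- ===== LEMMAS AND PROOFS =====

-- folding min over a list everything of which is ≥ x leaves x
lemma foldl_min_of_le (t : List Int) (x : Int) (h : ∀ y ∈ t, x ≤ y) : t.foldl min x = x := by
  induction t generalizing x with
  | nil => rfl
  | cons y t ih =>
    have hxy : min x y = x := min_eq_left (h y (by simp))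
    simp only [List.foldl_cons, hxy]
    exact ih x (fun z hz => h z (by simp [hz]))

-- every index in B's diffs list built from enumerate toks s is ≥ s
lemma mem_diffs_ge (toks : List (Option String)) (t0 : Option String) (s : Int) (y : Int)
    (hy : y ∈ ((PySem.List.enumerate toks s).filter (fun p => p.2 != t0)).map (fun p => p.1)) :
    s ≤ y := by
  rcases List.mem_map.mp hy with ⟨p, hp, rfl⟩
  have hmem := List.mem_of_mem_filter hp
  rcases (PySem.List.mem_enumerate_iff _ _ _).mp hmem with ⟨k, hk, rfl⟩
  simp

-- B's "min of all differing indices" equals the index of the FIRST differing token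
lemma B_eq_findIdx (toks : List (Option String)) (t0 : Option String) (s : Int) :
    (if ((PySem.List.enumerate toks s).filter (fun p => p.2 != t0)).map (fun p => p.1) = []
      then none
      else PySem.List.min? (((PySem.List.enumerate toks s).filter (fun p => p.2 != t0)).map (fun p => p.1)) (fun x => x))
    = (toks.findIdx? (fun t => t != t0)).map (fun k => s + (k : Int)) := by
  induction toks generalizing s with
  | nil => simp [PySem.List.enumerate_nil]
  | cons t toks ih =>
    rw [PySem.List.enumerate_cons, List.findIdx?_cons]
    by_cases hd : (t != t0) = true
    · -- head differs: diffs = s :: rest, min = s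
      simp only [List.filter_cons, hd, if_pos, List.map_cons]
      rw [if_neg (List.cons_ne_nil _ _)]
      rw [PySem.List.min?_id_cons]
      rw [foldl_min_of_le _ s (fun y hy => le_trans (by omega) (mem_diffs_ge toks t0 (s+1) y hy))]
      simp
    · -- head equal: diffs are those of the tail from s+1
      have hd' : (t != t0) = false := by simpa using hd
      simp only [List.filter_cons, hd', Bool.false_eq_true, if_false]
      rw [ih (s + 1)]
      cases toks.findIdx? (fun t => t != t0) with
      | none => rfl
      | some k => simp; omega

-- A's loop, given that every line the scan reaches has a token, returns (accumulator + index of first differing token)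
lemma A_eq_findIdx (lines : List String) (istep : String) (a : Int)
    (H : ∀ i < lines.length,
      (∀ j < i, (lines.map pvTok?)[j]? = some (some istep)) → (lines.map pvTok?)[i]? ≠ some none) :
    getNatomsLoopA lines istep a
      = ((lines.map pvTok?).findIdx? (fun t => t != some istep)).map (fun k => a + (k : Int)) := by
  induction lines generalizing a with
  | nil => rfl
  | cons l0 rest ih =>
    simp only [List.map_cons, List.findIdx?_cons]
    cases htok : pvTok? l0 with
    | none =>
      exact absurd (by simp [htok]) (H 0 (by simp) (by omega))
    | some t =>
      by_cases hne : t = istep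
      · subst hne
        simp only [getNatomsLoopA, htok, ne_eq, not_true_eq_false, if_false, bne_self_eq_false,
          Bool.false_eq_true]
        have H' : ∀ i < rest.length,
            (∀ j < i, (rest.map pvTok?)[j]? = some (some t)) → (rest.map pvTok?)[i]? ≠ some none := by
          intro i hi hj
          have := H (i + 1) (by simp; omega) (by
            intro j hjlt
            cases j with
            | zero => simp [htok]
            | succ j' => simpa using hj j' (by omega))
          simpa using this
        rw [ih (a + 1) H']
        cases (rest.map pvTok?).findIdx? (fun x => x != some t) with
        | none => rfl
        | some k => simp; omega
      · simp only [getNatomsLoopA, htok]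
        rw [if_pos (by exact hne), if_pos (by simp [hne])]
        simp

-- ===== VERDICT =====
theorem get_natoms_spec : Claim_equal_get_natoms := by
  intro lines _ hpre
  obtain ⟨hne, H⟩ := hpre
  unfold Spec_get_natoms get_natoms get_natoms_alt
  cases lines with
  | nil => exact absurd rfl hne
  | cons l0 rest =>
    simp only [List.map_cons, List.head?_cons]
    cases htok : pvTok? l0 with
    | none =>
      exact absurd (by simp [htok]) (H 0 (by simp) (by omega))
    | some istep =>
      have HA : ∀ i < (l0 :: rest).length,
          (∀ j < i, ((l0 :: rest).map pvTok?)[j]? = some (some istep)) →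
          ((l0 :: rest).map pvTok?)[i]? ≠ some none := by
        intro i hi hj
        exact H i hi (fun j hjlt => by rw [hj j hjlt]; simp [htok])
      have hA := A_eq_findIdx (l0 :: rest) istep 0 HA
      have hB := B_eq_findIdx ((l0 :: rest).map pvTok?) (some istep) 0
      simp only [List.map_cons, htok] at hA hB
      exact hA.trans hB.symm
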